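-- pv_equiv track=rewrite | github.com/soyoung96/CodingTest | DFS_BFS/프로그래머스/[kakao2020]괄호변환.py | solution
-- ===== SOURCE A (Python) =====
-- def chkRight(p): #올바른 문자열인지 확인
--
--     sum=0
--
--     for i in p:
--         if(i == "("):
--             sum+=1
--         else:
--             sum-=1
--         if(sum<0): #올바르지 않은 문자열
--             return False
--
--     if(sum!=0): #올바르지 않은 문자열
--         return False
--     else:#올바른 문자열
--         return True
--
-- def reversingP(p):
--
--     result=""
--     for i in p:
--         if(i=="("):
--             result+=")"
--         elif(i==")"):
--             result+="("
--
--     return result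
--
-- def splitP(p): #균형 균형 으로 분리하기
--     left = 0
--     right = 0
--     mid=0
--     for ind,i in enumerate(p):
--         if(i == "("):
--             left+=1
--         else:
--             right +=1
--         if(left == right):
--             mid=ind
--             break
--
--     if(mid+1 <= len(p)):
--         result = (p[:mid+1],p[mid+1:])
--
--     else: #v는 빈 문자열이 될 수 있습니다.
--         result = (p,"")
--
--     return result
--
-- def solution(p):
--
--     if(p==""): #입력이 빈 문자열인 경우, 빈 문자열을 반환합니다.
--         return p
--     u,v = splitP(p)#문자열 w를 두 "균형잡힌 괄호 문자열" u, v로 분리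
--     if(chkRight(u)):
--         return u + solution(v)#이어붙여서 반환
--
--     else:
--         tmpAnswer =""
--         tmpAnswer+="("#빈 문자열에 첫 번째 문자로 '('를 붙입니다.
--         tmpAnswer+=solution(v)#문자열 v에 대해 1단계부터 재귀적으로 수행한 결과 문자열 이어 붙입니다.
--         tmpAnswer+=")"
--         tmpAnswer+=reversingP(u[1:len(u)-1])#u의 첫 번째와 마지막 문자를 제거하고, 나머지 문자열의 괄호 방향을 뒤집어서 뒤에 붙입니다.
--
--         return tmpAnswer
-- ===== SOURCE B (Python) =====
-- def _ok(s):
--     bal = 0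
--     low = 0
--     for ch in s:
--         bal += 1 if ch == '(' else -1
--         low = min(low, bal)
--     return bal == 0 and low >= 0
--
--
-- def _flip(s):
--     return ''.join(')' if ch == '(' else '(' for ch in s if ch in '()')
--
--
-- def solution(p):
--     # one pass: partition p into primitive components (cut when the running
--     # balance returns to zero; if it never does again, cut a single char)
--     comps = []
--     i = 0
--     n = len(p)
--     while i < n:
--         bal = 0
--         j = i
--         cut = None
--         while j < n:
--             bal += 1 if p[j] == '(' else -1
--             if bal == 0:
--                 cut = j
--                 break
--             j += 1
--         end = cut + 1 if cut is not None else i + 1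
--         comps.append(p[i:end])
--         i = end
--     # backward fold over the components
--     acc = ""
--     for c in reversed(comps):
--         if _ok(c):
--             acc = c + acc
--         else:
--             acc = "(" + acc + ")" + _flip(c[1:-1])
--     return acc
-- ===== Notes on version B (the rewrite author's own statement) =====
-- stated objective: alternative
-- what changed: B first partitions p into its list of primitive components in an explicit scanning loop, then builds the answer by a single backward fold over that list with an accumulator string, replacing A's nested split-then-recurse structure; the correctness check tracks (balance, min-prefix) in one pass instead of early-returning.
import Mathlib
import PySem

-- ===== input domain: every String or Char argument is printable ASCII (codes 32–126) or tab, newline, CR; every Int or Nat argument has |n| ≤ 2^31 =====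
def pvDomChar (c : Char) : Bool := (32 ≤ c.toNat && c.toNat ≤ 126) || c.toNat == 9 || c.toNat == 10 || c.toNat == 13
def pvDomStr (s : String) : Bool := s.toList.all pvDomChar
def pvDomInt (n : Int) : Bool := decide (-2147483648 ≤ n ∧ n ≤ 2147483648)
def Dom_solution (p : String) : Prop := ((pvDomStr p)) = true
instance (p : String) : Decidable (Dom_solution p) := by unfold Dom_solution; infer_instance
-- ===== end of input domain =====

-- B replaces A's nested split/recursion by an up-front partition into primitive
-- components followed by one backward fold with an accumulator (alternative
-- decomposition, same cost).

-- ===== PORT A =====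

-- chkRight: running sum, early False on a negative prefix, final sum must be 0
def chkRightA : List Char → Int → Bool
  | [], s => s == 0
  | c :: rest, s =>
    let s' := if c = '(' then s + 1 else s - 1
    if s' < 0 then false else chkRightA rest s'

-- reversingP: '(' → ')', ')' → '(', any other character is skipped
def reversingA : List Char → List Char
  | [] => []
  | c :: rest =>
    (if c = '(' then [')'] else if c = ')' then ['('] else []) ++ reversingA rest

-- splitP's loop: two counters left/right, first index where they become equal
def findMidA : List Char → Int → Int → Nat → Option Nat
  | [], _, _, _ => none
  | c :: rest, l, r, ind =>
    let l' := if c = '(' then l + 1 else l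
    let r' := if c = '(' then r else r + 1
    if l' = r' then some ind else findMidA rest l' r' (ind + 1)

def splitA (p : List Char) : List Char × List Char :=
  let mid : Nat := (findMidA p 0 0 0).getD 0
  if mid + 1 ≤ p.length then (p.take (mid + 1), p.drop (mid + 1)) else (p, [])

theorem splitA_snd_lt (p : List Char) (h : p ≠ []) : (splitA p).2.length < p.length := by
  have hp : 0 < p.length := List.length_pos_iff.mpr h
  unfold splitA
  by_cases hc : ((findMidA p 0 0 0).getD 0) + 1 ≤ p.length <;>
    simp [hc, List.length_drop] <;> omega

def solutionCore (p : List Char) : List Char :=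
  if p = [] then p
  else
    let u := (splitA p).1
    let v := (splitA p).2
    if chkRightA u 0 then u ++ solutionCore v
    else '(' :: (solutionCore v ++ [')'] ++ reversingA ((u.drop 1).take (u.length - 2)))
termination_by p.length
decreasing_by all_goals exact splitA_snd_lt p (by assumption)

def solution (p : String) : String := String.mk (solutionCore p.toList)

-- ===== PORT B =====

-- _ok: one pass tracking (balance, minimum prefix balance)
def okB (p : List Char) : Bool :=
  let r := p.foldl
    (fun (st : Int × Int) c =>
      let b := st.1 + (if c = '(' then 1 else -1)
      (b, min st.2 b)) (0, 0)
  r.1 == 0 && decide (0 ≤ r.2)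

-- _flip: keep only parentheses, mapped to the opposite one
def flipB (p : List Char) : List Char :=
  p.filterMap (fun c => if c = '(' then some ')' else if c = ')' then some '(' else none)

-- inner scan: first index (from ind) where the running balance returns to zero
def firstZeroB : List Char → Int → Nat → Option Nat
  | [], _, _ => none
  | c :: rest, bal, j =>
    let b := bal + (if c = '(' then 1 else -1)
    if b = 0 then some j else firstZeroB rest b (j + 1)

-- length of the first primitive component (1-char fallback when balance never returns to 0)
def cutLenB (p : List Char) : Nat :=
  match firstZeroB p 0 0 with
  | some j => j + 1
  | none => 1

theorem cutLenB_pos (p : List Char) : 1 ≤ cutLenB p := by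
  unfold cutLenB; cases firstZeroB p 0 0 <;> simp

-- the full component list, built in one sweep
def compsB (p : List Char) : List (List Char) :=
  if h : p = [] then []
  else
    let e := cutLenB p
    p.take e :: compsB (p.drop e)
termination_by p.length
decreasing_by
  have h1 : 1 ≤ cutLenB p := cutLenB_pos p
  have hp : 0 < p.length := List.length_pos_iff.mpr (by assumption)
  simp [List.length_drop]; omega

-- backward fold over the components with accumulator acc
def foldStepB (c acc : List Char) : List Char :=
  if okB c then c ++ acc
  else '(' :: (acc ++ [')'] ++ flipB ((c.drop 1).dropLast))

def solutionAltCore (p : List Char) : List Char :=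
  (compsB p).foldr foldStepB []

def solution_alt (p : String) : String := String.mk (solutionAltCore p.toList)

-- ===== PRECONDITION & SPEC =====
def Spec_solution (p : String) (out : String) : Prop := out = solution_alt p
instance (p : String) (out : String) : Decidable (Spec_solution p out) := by unfold Spec_solution; infer_instance

-- ===== CLAIM (what is proved, stated in full; the proofs are below) =====
def Claim_equal_solution : Prop := ∀ (p : String), Dom_solution p → Spec_solution p (solution p)

-- ===== LEMMAS AND PROOFS =====

-- A's two counters and B's single balance find the same index
theorem findMid_eq_firstZero (p : List Char) :
    ∀ (l r : Int) (ind : Nat), findMidA p l r ind = firstZeroB p (l - r) ind := by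
  induction p with
  | nil => intro l r ind; rfl
  | cons c rest ih =>
    intro l r ind
    by_cases hc : c = '('
    · simp only [findMidA, firstZeroB, hc, reduceIte]
      by_cases h : l + 1 = r
      · rw [if_pos h, if_pos (by omega : l - r + 1 = 0)]
      · rw [if_neg h, if_neg (by omega : ¬ (l - r + 1 = 0)), ih (l + 1) r (ind + 1)]
        congr 1; omega
    · simp only [findMidA, firstZeroB, hc, if_neg, ite_false, reduceIte]
      by_cases h : l = r + 1
      · rw [if_pos h, if_pos (by omega : l - r + -1 = 0)]
      · rw [if_neg h, if_neg (by omega : ¬ (l - r + -1 = 0)), ih l (r + 1) (ind + 1)]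
        congr 1; omega

-- a found index lies within the list
theorem firstZeroB_lt (p : List Char) :
    ∀ (b : Int) (ind j : Nat), firstZeroB p b ind = some j → j < ind + p.length := by
  induction p with
  | nil => intro b ind j h; simp [firstZeroB] at h
  | cons c rest ih =>
    intro b ind j h
    simp only [firstZeroB] at h
    by_cases h0 : b + (if c = '(' then 1 else -1) = 0
    · rw [if_pos h0] at h
      simp only [Option.some.injEq] at h
      simp [List.length_cons]; omega
    · rw [if_neg h0] at h
      have := ih _ _ _ h
      simp [List.length_cons]; omega

-- splitA computes exactly (take of the first component, the rest)
theorem splitA_eq_cut (p : List Char) (h : p ≠ []) :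
    splitA p = (p.take (cutLenB p), p.drop (cutLenB p)) := by
  have hp : 0 < p.length := List.length_pos_iff.mpr h
  unfold splitA cutLenB
  rw [findMid_eq_firstZero p 0 0 0, show (0:Int) - 0 = 0 from by ring]
  cases hz : firstZeroB p 0 0 with
  | none =>
    simp only [hz, Option.getD_none]
    rw [if_pos (by omega : 0 + 1 ≤ p.length)]
  | some j =>
    have hj : j < 0 + p.length := firstZeroB_lt p 0 0 j hz
    simp only [hz, Option.getD_some]
    rw [if_pos (by omega : j + 1 ≤ p.length)]

-- the fold step of okB, named for the proofs
def pvStep (st : Int × Int) (c : Char) : Int × Int :=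
  let b := st.1 + (if c = '(' then 1 else -1)
  (b, min st.2 b)

theorem okB_eq_pvStep (p : List Char) :
    okB p = ((p.foldl pvStep (0, 0)).1 == 0 && decide (0 ≤ (p.foldl pvStep (0, 0)).2)) := rfl

-- the accumulated minimum only decreases along B's fold
theorem pvStep_low_le (p : List Char) :
    ∀ (b l : Int), (p.foldl pvStep (b, l)).2 ≤ l := by
  induction p with
  | nil => intro b l; simp
  | cons c rest ih =>
    intro b l
    rw [List.foldl_cons]
    exact le_trans (ih _ _) (min_le_left _ _)

-- A's early-return check agrees with B's (balance, min-prefix) check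
theorem chk_eq_gen (p : List Char) :
    ∀ (b l : Int), 0 ≤ l →
      chkRightA p b =
        ((p.foldl pvStep (b, l)).1 == 0 && decide (0 ≤ (p.foldl pvStep (b, l)).2)) := by
  induction p with
  | nil => intro b l hl; simp [chkRightA, hl]
  | cons c rest ih =>
    intro b l hl
    simp only [chkRightA, List.foldl_cons]
    have hstep : pvStep (b, l) c
        = (b + (if c = '(' then 1 else -1), min l (b + (if c = '(' then 1 else -1))) := rfl
    simp only [hstep]
    have harith : (if c = '(' then b + 1 else b - 1) = b + (if c = '(' then 1 else -1) := by
      by_cases hc : c = '(' <;> simp [hc] <;> omega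
    rw [harith]
    by_cases hneg : b + (if c = '(' then 1 else -1) < 0
    · rw [if_pos hneg]
      have hle := pvStep_low_le rest (b + (if c = '(' then 1 else -1))
        (min l (b + (if c = '(' then 1 else -1)))
      have h2 : ¬ (0 ≤ (rest.foldl pvStep (b + (if c = '(' then 1 else -1),
          min l (b + (if c = '(' then 1 else -1)))).2) := by
        have : min l (b + (if c = '(' then 1 else -1)) ≤ b + (if c = '(' then 1 else -1) :=
          min_le_right _ _
        omega
      simp [h2]
    · rw [if_neg hneg]
      exact ih _ _ (le_min hl (by omega))

theorem chk_eq_ok (p : List Char) : chkRightA p 0 = okB p := by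
  rw [okB_eq_pvStep, chk_eq_gen p 0 0 le_rfl]

-- A's character-by-character flip equals B's filterMap
theorem reversing_eq_flip (p : List Char) : reversingA p = flipB p := by
  induction p with
  | nil => rfl
  | cons c rest ih =>
    by_cases h1 : c = '(' <;> by_cases h2 : c = ')' <;>
      simp [reversingA, flipB, h1, h2, ih, List.filterMap]

-- the two inner slices u[1:len-1] and c[1:-1] coincide
theorem slice_eq (u : List Char) : (u.drop 1).take (u.length - 2) = (u.drop 1).dropLast := by
  rw [List.dropLast_eq_take]
  congr 1
  simp only [List.length_drop]
  omega

-- main equality on the core lists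
theorem core_eq (p : List Char) : solutionCore p = solutionAltCore p := by
  induction hn : p.length using Nat.strong_induction_on generalizing p with
  | _ n ih =>
    by_cases h : p = []
    · subst h; simp [solutionCore, solutionAltCore, compsB]
    · have hp : 0 < p.length := List.length_pos_iff.mpr h
      have hsplit := splitA_eq_cut p h
      have hvlen : (p.drop (cutLenB p)).length < p.length := by
        have := cutLenB_pos p; simp [List.length_drop]; omega
      have ihv : solutionCore (p.drop (cutLenB p)) = solutionAltCore (p.drop (cutLenB p)) :=
        ih (p.drop (cutLenB p)).length (by omega) _ rfl
      rw [solutionCore, if_neg h, hsplit]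
      simp only [solutionAltCore]
      rw [compsB, dif_neg h]
      simp only [List.foldr_cons, foldStepB]
      rw [chk_eq_ok, reversing_eq_flip, slice_eq, ihv]
      rfl

-- ===== VERDICT (by name: the statement is the Claim_ definition above) =====
theorem solution_spec : Claim_equal_solution := by
  intro p _
  unfold Spec_solution solution solution_alt
  rw [core_eq]
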